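-- pv_equiv track=rewrite | github.com/DavidGathimbaM/FHI_SOUTH_AFRICA | src/contract/engine.py | map_cols_to_mapped_schema
-- ===== SOURCE A (Python) =====
-- def map_cols_to_mapped_schema(cols: list[str]) -> list[str]:
--     """
--     Maps raw column names to post-mapping names.
--     - ID -> business_id
--     - removes ID duplicates
--     """
--     out = []
--     for c in cols:
--         if c == "ID":
--             c = "business_id"
--         if c not in out and c != "ID":
--             out.append(c)
--     return out
-- ===== SOURCE B (Python) =====
-- def map_cols_to_mapped_schema(cols: list[str]) -> list[str]:
--     """
--     Maps raw column names to post-mapping names.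
--     - ID -> business_id
--     - removes duplicates, keeping first occurrences
--     """
--     xs = ["business_id" if c == "ID" else c for c in cols]
--     out = []
--     while xs:
--         h = xs[0]
--         out.append(h)
--         xs = [x for x in xs[1:] if x != h]
--     return out
-- ===== Notes on version B (the rewrite author's own statement) =====
-- stated objective: alternative
-- what changed: Replaces the single scanning loop with a seen-list membership test (and its dead c != 'ID' guard) by a rename pass followed by a recursive head-and-filter dedup that maintains no seen set: it keeps each head and deletes all its later duplicates from the tail before recursing.
import Mathlib
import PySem

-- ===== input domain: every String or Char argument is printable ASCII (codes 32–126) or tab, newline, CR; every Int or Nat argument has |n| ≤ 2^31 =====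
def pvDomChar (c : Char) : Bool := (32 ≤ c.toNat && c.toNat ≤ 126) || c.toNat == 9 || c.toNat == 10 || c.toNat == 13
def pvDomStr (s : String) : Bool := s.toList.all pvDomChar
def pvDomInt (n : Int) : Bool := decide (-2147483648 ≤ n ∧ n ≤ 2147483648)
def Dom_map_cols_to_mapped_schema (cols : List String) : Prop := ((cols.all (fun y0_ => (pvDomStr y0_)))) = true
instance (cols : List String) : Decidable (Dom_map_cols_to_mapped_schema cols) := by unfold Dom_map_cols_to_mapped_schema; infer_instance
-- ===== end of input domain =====

-- B replaces A's seen-list scanning loop by a rename pass plus a recursive head-and-filter dedup (same cost, different algorithm).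

-- ===== PORT A =====
-- Port of A: one loop; rename ID, then append if not already present and not "ID".
def map_cols_to_mapped_schema (cols : List String) : List String :=
  cols.foldl (fun out c =>
    let c' := if c == "ID" then "business_id" else c
    if ¬ out.contains c' ∧ c' ≠ "ID" then out ++ [c'] else out) []

-- ===== PORT B =====
-- B's dedup loop: keep the head, delete its later duplicates from the rest, continue.
def filterDedup : List String → List String
  | [] => []
  | h :: t => h :: filterDedup (t.filter (fun x => x ≠ h))
termination_by xs => xs.length
decreasing_by
  simp only [List.unattach, List.length_map]
  exact Nat.lt_succ_of_le (le_trans (List.length_filter_le _ _) (by simp))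

-- Port of B: rename pass, then the head-and-filter dedup loop.
def map_cols_to_mapped_schema_alt (cols : List String) : List String :=
  filterDedup (cols.map (fun c => if c == "ID" then "business_id" else c))

-- ===== PRECONDITION & SPEC =====
def Spec_map_cols_to_mapped_schema (cols : List String) (out : List String) : Prop := out = map_cols_to_mapped_schema_alt cols
instance (cols : List String) (out : List String) : Decidable (Spec_map_cols_to_mapped_schema cols out) := by unfold Spec_map_cols_to_mapped_schema; infer_instance

-- ===== CLAIM (what is proved, stated in full; the proofs are below) =====
def Claim_equal_map_cols_to_mapped_schema : Prop := ∀ (cols : List String), Dom_map_cols_to_mapped_schema cols → Spec_map_cols_to_mapped_schema cols (map_cols_to_mapped_schema cols)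

-- ===== LEMMAS AND PROOFS =====

-- A's loop body, after renaming, is exactly PySem.Set.add of the renamed element.
lemma foldA_eq_foldAdd (cols : List String) (out : List String) :
    cols.foldl (fun out c =>
      let c' := if c == "ID" then "business_id" else c
      if ¬ out.contains c' ∧ c' ≠ "ID" then out ++ [c'] else out) out
    = (cols.map (fun c => if c == "ID" then "business_id" else c)).foldl PySem.Set.add out := by
  induction cols generalizing out with
  | nil => rfl
  | cons c cs ih =>
    simp only [List.foldl_cons, List.map_cons]
    rw [ih]
    congr 1
    by_cases h : c = "ID"
    · simp [h, PySem.Set.add, PySem.Set.contains]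
    · simp [h, PySem.Set.add, PySem.Set.contains]

-- The seen-set fold with accumulator out equals out followed by the
-- head-and-filter dedup of the elements not already in out.
lemma foldAdd_eq_filterDedup (l : List String) (out : List String) :
    l.foldl PySem.Set.add out = out ++ filterDedup (l.filter (fun x => ! out.contains x)) := by
  induction l generalizing out with
  | nil => simp only [List.filter_nil, List.foldl_nil, filterDedup, List.append_nil]
  | cons h t ih =>
    simp only [List.foldl_cons, List.filter_cons]
    by_cases hmem : out.contains h
    · have hadd : PySem.Set.add out h = out := by
        simp [PySem.Set.add, PySem.Set.contains]
        simpa using hmem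
      rw [hadd, ih]
      have : h ∈ out := by simpa using hmem
      simp [this]
    · have hadd : PySem.Set.add out h = out ++ [h] := by
        simp [PySem.Set.add, PySem.Set.contains]
        simpa using hmem
      rw [hadd, ih]
      simp only [hmem, Bool.not_false, if_pos, List.append_assoc, List.singleton_append]
      have hne : h ∉ out := by simpa using hmem
      simp only [filterDedup, List.filter_filter]
      congr 2
      congr 1
      apply List.filter_congr
      intro x _
      simp [Bool.and_comm]

theorem map_cols_to_mapped_schema_spec : Claim_equal_map_cols_to_mapped_schema := by
  intro cols _
  unfold Spec_map_cols_to_mapped_schema map_cols_to_mapped_schema map_cols_to_mapped_schema_alt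
  rw [foldA_eq_foldAdd, foldAdd_eq_filterDedup]
  simp
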